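-- pv_equiv track=rewrite | github.com/sipyourdrink-ltd/bernstein | src/bernstein/core/guardrails.py | _is_file_deleted
-- ===== SOURCE A (Python) =====
-- def _is_file_deleted(diff: str, filepath: str) -> bool:
--     """Return True if *filepath* was deleted in the diff."""
--     header_prefix = f"diff --git a/{filepath}"
--     in_file = False
--     for line in diff.splitlines():
--         if line.startswith("diff --git "):
--             in_file = line.startswith(header_prefix)
--         elif in_file and line.startswith("deleted file mode"):
--             return True
--         elif in_file and line.startswith("@@"):
--             # Past the extended header — no deletion marker
--             break
--     return False
-- ===== SOURCE B (Python) =====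
-- def _is_file_deleted(diff: str, filepath: str) -> bool:
--     """Return True if *filepath* was deleted in the diff."""
--     prefix = f"diff --git a/{filepath}"
--     lines = diff.splitlines()
--     # Phase 1: split the diff into per-file segments, one per 'diff --git ' header.
--     segments = []
--     i = 0
--     while i < len(lines):
--         if lines[i].startswith("diff --git "):
--             j = i + 1
--             while j < len(lines) and not lines[j].startswith("diff --git "):
--                 j += 1
--             segments.append(lines[i:j])
--             i = j
--         else:
--             i += 1
--     # Phase 2: scan segments whose header matches the prefix.
--     for seg in segments:
--         if seg[0].startswith(prefix):
--             for line in seg[1:]: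
--                 if line.startswith("deleted file mode"):
--                     return True
--                 if line.startswith("@@"):
--                     return False
--     return False
-- ===== Notes on version B (the rewrite author's own statement) =====
-- stated objective: alternative
-- what changed: Replaces A's single stateful pass (an in_file flag mutated per line) by a two-phase decomposition: first split the diff into per-file segments at 'diff --git ' headers, then scan matching segments for the deletion/hunk markers.
import Mathlib
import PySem

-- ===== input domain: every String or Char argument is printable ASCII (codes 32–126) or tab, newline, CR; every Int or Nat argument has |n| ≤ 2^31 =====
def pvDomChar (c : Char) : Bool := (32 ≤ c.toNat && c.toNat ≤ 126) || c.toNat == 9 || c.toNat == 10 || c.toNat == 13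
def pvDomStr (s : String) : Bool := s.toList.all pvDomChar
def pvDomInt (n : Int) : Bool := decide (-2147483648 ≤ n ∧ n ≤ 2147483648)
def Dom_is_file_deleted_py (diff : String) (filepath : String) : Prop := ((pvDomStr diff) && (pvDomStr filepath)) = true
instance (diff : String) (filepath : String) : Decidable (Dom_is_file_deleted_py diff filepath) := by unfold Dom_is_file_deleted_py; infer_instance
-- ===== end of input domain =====

-- B replaces A's single stateful pass (in_file flag) by a two-phase decomposition:
-- split into per-file segments at 'diff --git ' headers, then scan matching segments.

-- ===== PORT A =====
-- the for-loop of A: state is the in_file flag; early return via the Bool result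
def goA (pre : String) (inFile : Bool) : List String → Bool
  | [] => false
  | l :: ls =>
    if PySem.Str.startswith l "diff --git " then
      goA pre (PySem.Str.startswith l pre) ls
    else if inFile && PySem.Str.startswith l "deleted file mode" then true
    else if inFile && PySem.Str.startswith l "@@" then false
    else goA pre inFile ls

def is_file_deleted_py (diff : String) (filepath : String) : Bool :=
  goA ("diff --git a/" ++ filepath) false (PySem.Str.splitlines diff)

-- ===== PORT B =====
def isHdr (l : String) : Bool := PySem.Str.startswith l "diff --git "

-- phase 1 of B: the outer while loop; the inner while computes the segment end,
-- i.e. the segment body is the takeWhile of non-header lines and i jumps past it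
def splitSegs : List String → List (List String)
  | [] => []
  | l :: ls =>
    if isHdr l then (l :: ls.takeWhile (fun x => !isHdr x)) :: splitSegs (ls.dropWhile (fun x => !isHdr x))
    else splitSegs ls
termination_by ls => ls.length
decreasing_by
  · simpa using Nat.lt_succ_of_le (List.length_dropWhile_le _ _)
  · simp

-- inner for-loop of phase 2 over seg[1:]
def scanSeg : List String → Option Bool
  | [] => none
  | l :: ls =>
    if PySem.Str.startswith l "deleted file mode" then some true
    else if PySem.Str.startswith l "@@" then some false
    else scanSeg ls

-- outer for-loop of phase 2
def scanSegs (pre : String) : List (List String) → Bool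
  | [] => false
  | seg :: rest =>
    match seg with
    | [] => scanSegs pre rest
    | h :: tl =>
      if PySem.Str.startswith h pre then
        match scanSeg tl with
        | some b => b
        | none => scanSegs pre rest
      else scanSegs pre rest

def is_file_deleted_py_alt (diff : String) (filepath : String) : Bool :=
  scanSegs ("diff --git a/" ++ filepath) (splitSegs (PySem.Str.splitlines diff))

-- ===== PRECONDITION & SPEC =====
def Spec_is_file_deleted_py (diff : String) (filepath : String) (out : Bool) : Prop := out = is_file_deleted_py_alt diff filepath
instance (diff : String) (filepath : String) (out : Bool) : Decidable (Spec_is_file_deleted_py diff filepath out) := by unfold Spec_is_file_deleted_py; infer_instance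

-- ===== CLAIM (what is proved, stated in full; the proofs are below) =====
def Claim_equal_is_file_deleted_py : Prop := ∀ (diff : String) (filepath : String), Dom_is_file_deleted_py diff filepath → Spec_is_file_deleted_py diff filepath (is_file_deleted_py diff filepath)

-- ===== LEMMAS AND PROOFS =====

-- with in_file = False, A skips non-header lines
theorem goA_false_dropWhile (pre : String) (ls : List String) :
    goA pre false ls = goA pre false (ls.dropWhile (fun x => !isHdr x)) := by
  induction ls with
  | nil => rfl
  | cons l ls ih =>
    by_cases h : isHdr l = true
    · simp only [List.dropWhile, h, Bool.not_true]
    · have hb : PySem.Str.startswith l "diff --git " = false := by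
        simpa [isHdr] using h
      simp only [List.dropWhile, show (!isHdr l) = true by simp [h]]
      rw [← ih]
      simp only [goA, hb, Bool.false_eq_true, if_false, Bool.false_and]

-- with in_file = True, A on the current segment body behaves like scanSeg,
-- falling back (with the flag irrelevant at the next header) on none
theorem goA_true_scanSeg (pre : String) (ls : List String) :
    goA pre true ls =
      (match scanSeg (ls.takeWhile (fun x => !isHdr x)) with
       | some b => b
       | none => goA pre false (ls.dropWhile (fun x => !isHdr x))) := by
  induction ls with
  | nil => rfl
  | cons l ls ih =>
    by_cases h : isHdr l = true
    · have hb : PySem.Str.startswith l "diff --git " = true := by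
        simpa [isHdr] using h
      simp only [List.takeWhile, List.dropWhile, h, Bool.not_true, scanSeg, goA, hb, if_true]
    · have hb : PySem.Str.startswith l "diff --git " = false := by
        simpa [isHdr] using h
      simp only [List.takeWhile, List.dropWhile, show (!isHdr l) = true by simp [h],
        goA, scanSeg, hb, Bool.false_eq_true, if_false, Bool.true_and]
      split_ifs with hd ha
      · rfl
      · rfl
      · exact ih

-- main lemma (by strong induction on the length, since splitSegs jumps past segments):
-- the stateful pass started with in_file = False equals the segment scan
theorem goA_eq_scanSegs_aux (pre : String) :
    ∀ (n : Nat) (ls : List String), ls.length ≤ n →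
      goA pre false ls = scanSegs pre (splitSegs ls) := by
  intro n
  induction n with
  | zero =>
    intro ls hls
    have : ls = [] := List.eq_nil_of_length_eq_zero (Nat.le_zero.mp hls)
    subst this
    simp [goA, splitSegs, scanSegs]
  | succ n ih =>
    intro ls hls
    match ls with
    | [] => simp [goA, splitSegs, scanSegs]
    | l :: ls =>
      have hlen : ls.length ≤ n := by simpa using hls
      by_cases h : isHdr l = true
      · have hb : PySem.Str.startswith l "diff --git " = true := by
          simpa [isHdr] using h
        have hdrop : (ls.dropWhile (fun x => !isHdr x)).length ≤ n :=
          le_trans (List.length_dropWhile_le _ _) hlen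
        rw [show splitSegs (l :: ls) =
            (l :: ls.takeWhile (fun x => !isHdr x)) ::
              splitSegs (ls.dropWhile (fun x => !isHdr x)) from by
          simp [splitSegs, h]]
        simp only [scanSegs]
        by_cases hp : PySem.Str.startswith l pre = true
        · simp only [goA, hb, if_true, hp, goA_true_scanSeg]
          cases hs : scanSeg (ls.takeWhile (fun x => !isHdr x)) with
          | some b => rfl
          | none => exact ih _ hdrop
        · simp only [goA, hb, if_true, hp, Bool.false_eq_true, if_false]
          rw [goA_false_dropWhile]
          exact ih _ hdrop
      · have hb : PySem.Str.startswith l "diff --git " = false := by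
          simpa [isHdr] using h
        rw [show splitSegs (l :: ls) = splitSegs ls from by simp [splitSegs, h]]
        rw [show goA pre false (l :: ls) = goA pre false ls from by
          simp only [goA, hb, Bool.false_eq_true, if_false, Bool.false_and]]
        exact ih ls hlen

-- ===== VERDICT (by name: the statement is the Claim_ definition above) =====
theorem is_file_deleted_py_spec : Claim_equal_is_file_deleted_py := by
  intro diff filepath _
  unfold Spec_is_file_deleted_py is_file_deleted_py is_file_deleted_py_alt
  exact goA_eq_scanSegs_aux _ _ _ (le_refl _)
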